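-- pv_equiv track=rewrite | github.com/Buscedv/Ask | ask_lang/transpiler/utilities/parser_utils.py | get_tab_count
-- ===== SOURCE A (Python) =====
-- def get_tab_count(parsed: str) -> str:
-- 	parsed = parsed[::-1]
--
-- 	indents = ''
-- 	for char in parsed:
-- 		if char == '\t':
-- 			indents += char
-- 		elif char == '\n':
-- 			break
--
-- 	return indents
-- ===== SOURCE B (Python) =====
-- def get_tab_count(parsed: str) -> str:
-- 	n = 0
-- 	for ch in parsed:
-- 		if ch == '\n':
-- 			n = 0
-- 		elif ch == '\t':
-- 			n += 1
-- 	return '\t' * n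
-- ===== Notes on version B (the rewrite author's own statement) =====
-- stated objective: alternative
-- what changed: Replaces A's reverse-the-string-then-accumulate-until-newline loop by a single forward scan keeping a tab counter that resets at each newline, then builds the result by repetition; no reversal and no early break.
import Mathlib
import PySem

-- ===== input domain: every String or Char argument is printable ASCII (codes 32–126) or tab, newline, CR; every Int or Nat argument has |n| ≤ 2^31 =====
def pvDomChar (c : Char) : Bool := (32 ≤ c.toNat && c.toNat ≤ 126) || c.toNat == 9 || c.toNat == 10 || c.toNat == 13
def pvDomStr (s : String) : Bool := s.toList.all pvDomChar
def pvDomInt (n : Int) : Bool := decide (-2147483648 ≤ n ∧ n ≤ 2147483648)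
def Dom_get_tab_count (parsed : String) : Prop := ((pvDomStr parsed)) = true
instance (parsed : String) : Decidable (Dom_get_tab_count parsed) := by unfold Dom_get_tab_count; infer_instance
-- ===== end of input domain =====

-- B replaces A's reverse-then-accumulate-until-newline loop by one forward scan with a
-- tab counter reset at each newline (objective: alternative, no reversal, same cost).

-- ===== PORT A =====
-- the for-loop with 'break': walk the reversed chars, append tabs, stop at '\n'
def pvGoA : List Char → List Char → List Char
  | [], indents => indents
  | c :: rest, indents =>
    if c = '\t' then pvGoA rest (indents ++ [c])
    else if c = '\n' then indents
    else pvGoA rest indents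

def get_tab_count (parsed : String) : String :=
  -- parsed = parsed[::-1]  (s[::-1] is reverse: PySem.Str.slice?_none_none_neg_one)
  String.ofList (pvGoA parsed.toList.reverse [])

-- ===== PORT B =====
def get_tab_count_alt (parsed : String) : String :=
  let n : Int := parsed.toList.foldl
    (fun n ch => if ch = '\n' then 0 else if ch = '\t' then n + 1 else n) 0
  -- '\t' * n
  String.ofList (PySem.List.pyRepeat ['\t'] n)

-- ===== PRECONDITION & SPEC =====
def Spec_get_tab_count (parsed : String) (out : String) : Prop := out = get_tab_count_alt parsed
instance (parsed : String) (out : String) : Decidable (Spec_get_tab_count parsed out) := by unfold Spec_get_tab_count; infer_instance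

-- ===== CLAIM (what is proved, stated in full; the proofs are below) =====
def Claim_equal_get_tab_count : Prop := ∀ (parsed : String), Dom_get_tab_count parsed → Spec_get_tab_count parsed (get_tab_count parsed)

-- ===== LEMMAS AND PROOFS =====

-- A's loop: the result is the accumulator followed by one tab per tab in the
-- prefix of its input before the first '\n'.
theorem pvGoA_eq (cs acc : List Char) :
    pvGoA cs acc = acc ++ List.replicate ((cs.takeWhile (· ≠ '\n')).count '\t') '\t' := by
  induction cs generalizing acc with
  | nil => simp [pvGoA]
  | cons c rest ih =>
    by_cases ht : c = '\t'
    · subst ht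
      simp [pvGoA, ih, List.replicate_succ]
    · by_cases hn : c = '\n'
      · subst hn; simp [pvGoA]
      · simp [pvGoA, ht, hn, ih]

-- B's loop: the counter after scanning l is the number of tabs after the last
-- newline (i.e. in the pre-'\n' prefix of the reversal), plus the initial value
-- if l has no newline at all.
theorem pvFoldB_eq (l : List Char) (m : Int) :
    l.foldl (fun n ch => if ch = '\n' then 0 else if ch = '\t' then n + 1 else n) m
      = ((l.reverse.takeWhile (· ≠ '\n')).count '\t' : Int)
        + (if '\n' ∈ l then 0 else m) := by
  induction l using List.reverseRecOn generalizing m with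
  | nil => simp
  | append_singleton xs c ih =>
    rw [List.foldl_append]
    by_cases hn : c = '\n'
    · subst hn; simp
    · by_cases ht : c = '\t'
      · subst ht
        simp only [List.foldl_cons, List.foldl_nil, if_neg (by decide : ¬('\t' = '\n')), ih, List.reverse_append, List.reverse_cons, List.reverse_nil,
          List.nil_append, List.cons_append, List.takeWhile_cons, List.mem_append,
          List.mem_cons]
        have : ('\t' : Char) ≠ '\n' := by decide
        simp [this]
        ring
      · simp only [List.foldl_cons, List.foldl_nil, if_neg hn, if_neg ht, ih,
          List.reverse_append, List.reverse_cons, List.reverse_nil, List.nil_append,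
          List.cons_append, List.takeWhile_cons, List.mem_append, List.mem_cons]
        have hcn : (c ≠ '\n') := hn
        simp [hcn, ht, Ne.symm hcn]

-- ===== VERDICT (by name: the statement is the Claim_ definition above) =====
theorem get_tab_count_spec : Claim_equal_get_tab_count := by
  intro parsed _
  unfold Spec_get_tab_count get_tab_count get_tab_count_alt
  simp only [pvGoA_eq, pvFoldB_eq, List.nil_append]
  by_cases h : '\n' ∈ parsed.toList <;>
    simp [h, PySem.List.pyRepeat_singleton]
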